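-- pv_equiv track=rewrite | github.com/Sakshidevre19/smartbuyr_backend | products/views.py | get_product_image
-- ===== SOURCE A (Python) =====
-- def get_product_image(product_id, title, description):
--     """Generate product-specific image URL based on product ID, title and description"""
--     # Use a simple approach - different image for each product ID
--     base_id = (product_id % 100) + 1  # Use IDs 1-100
--
--     text = (title + ' ' + (description or '')).lower()
--
--     # Create categories with actual product images
--     if any(word in text for word in ['phone', 'mobile', 'smartphone', 'iphone', 'android']):
--         return f'https://cdn.dummyjson.com/product-images/{base_id}/1.jpg'
--     elif any(word in text for word in ['laptop', 'computer', 'pc', 'macbook']):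
--         return f'https://cdn.dummyjson.com/product-images/{base_id + 100}/1.jpg'
--     elif any(word in text for word in ['shirt', 'tshirt', 't-shirt', 'top', 'blouse']):
--         return f'https://cdn.dummyjson.com/product-images/{base_id + 200}/1.jpg'
--     elif any(word in text for word in ['shoe', 'sneaker', 'boot', 'footwear']):
--         return f'https://cdn.dummyjson.com/product-images/{base_id + 300}/1.jpg'
--     elif any(word in text for word in ['watch', 'smartwatch']):
--         return f'https://cdn.dummyjson.com/product-images/{base_id + 400}/1.jpg'
--     else:
--         return f'https://picsum.photos/300/300?random={product_id}'
-- ===== SOURCE B (Python) =====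
-- # B drops the ordered first-match priority chain entirely: it collects the offsets of
-- # ALL matching keywords and aggregates with min(); priority is encoded numerically.
-- _TABLE = [
--     ("phone", 0), ("mobile", 0), ("smartphone", 0), ("iphone", 0), ("android", 0),
--     ("laptop", 100), ("computer", 100), ("pc", 100), ("macbook", 100),
--     ("shirt", 200), ("tshirt", 200), ("t-shirt", 200), ("top", 200), ("blouse", 200),
--     ("shoe", 300), ("sneaker", 300), ("boot", 300), ("footwear", 300),
--     ("watch", 400), ("smartwatch", 400),
-- ]
--
-- def get_product_image(product_id, title, description):
--     text = (title + ' ' + (description or '')).lower()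
--     matches = [off for word, off in _TABLE if word in text]
--     if matches:
--         return f'https://cdn.dummyjson.com/product-images/{product_id % 100 + 1 + min(matches)}/1.jpg'
--     return f'https://picsum.photos/300/300?random={product_id}'
-- ===== Notes on version B (the rewrite author's own statement) =====
-- stated objective: alternative
-- what changed: A short-circuits through an ordered if/elif priority chain of per-group any() tests; B has no ordered first-match scan at all: it collects the offsets of ALL matching keywords in one comprehension and aggregates them with min(), priority being encoded numerically by the offset values.
import Mathlib
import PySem

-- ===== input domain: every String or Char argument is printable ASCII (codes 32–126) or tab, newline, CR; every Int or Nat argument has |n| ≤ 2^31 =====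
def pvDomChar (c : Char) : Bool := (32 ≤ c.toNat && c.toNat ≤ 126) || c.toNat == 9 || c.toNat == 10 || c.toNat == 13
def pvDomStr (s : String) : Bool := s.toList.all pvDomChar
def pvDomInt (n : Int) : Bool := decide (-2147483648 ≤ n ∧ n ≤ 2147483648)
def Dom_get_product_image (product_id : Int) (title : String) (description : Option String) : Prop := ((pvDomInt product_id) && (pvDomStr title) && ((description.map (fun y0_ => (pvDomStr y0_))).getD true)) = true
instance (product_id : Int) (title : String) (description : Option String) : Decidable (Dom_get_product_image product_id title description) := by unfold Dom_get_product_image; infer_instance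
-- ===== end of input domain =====

-- B replaces A's ordered if/elif first-match priority chain with a collect-then-aggregate
-- scheme: it gathers the offsets of ALL matching keywords and takes min(); alternative.

-- ===== PORT A =====
def get_product_image (product_id : Int) (title : String) (description : Option String) : String :=
  let base_id := PySem.Int.mod product_id 100 + 1
  let text := PySem.Str.lower (title ++ " " ++ description.getD "")
  if (["phone", "mobile", "smartphone", "iphone", "android"].any fun w => PySem.Str.isIn w text) then
    "https://cdn.dummyjson.com/product-images/" ++ PySem.Int.toStr base_id ++ "/1.jpg"
  else if (["laptop", "computer", "pc", "macbook"].any fun w => PySem.Str.isIn w text) then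
    "https://cdn.dummyjson.com/product-images/" ++ PySem.Int.toStr (base_id + 100) ++ "/1.jpg"
  else if (["shirt", "tshirt", "t-shirt", "top", "blouse"].any fun w => PySem.Str.isIn w text) then
    "https://cdn.dummyjson.com/product-images/" ++ PySem.Int.toStr (base_id + 200) ++ "/1.jpg"
  else if (["shoe", "sneaker", "boot", "footwear"].any fun w => PySem.Str.isIn w text) then
    "https://cdn.dummyjson.com/product-images/" ++ PySem.Int.toStr (base_id + 300) ++ "/1.jpg"
  else if (["watch", "smartwatch"].any fun w => PySem.Str.isIn w text) then
    "https://cdn.dummyjson.com/product-images/" ++ PySem.Int.toStr (base_id + 400) ++ "/1.jpg"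
  else
    "https://picsum.photos/300/300?random=" ++ PySem.Int.toStr product_id

-- ===== PORT B =====
def pvTable : List (String × Int) :=
  [("phone", 0), ("mobile", 0), ("smartphone", 0), ("iphone", 0), ("android", 0),
   ("laptop", 100), ("computer", 100), ("pc", 100), ("macbook", 100),
   ("shirt", 200), ("tshirt", 200), ("t-shirt", 200), ("top", 200), ("blouse", 200),
   ("shoe", 300), ("sneaker", 300), ("boot", 300), ("footwear", 300),
   ("watch", 400), ("smartwatch", 400)]

def get_product_image_alt (product_id : Int) (title : String) (description : Option String) : String :=
  let text := PySem.Str.lower (title ++ " " ++ description.getD "")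
  let found := pvTable.filterMap (fun p => if PySem.Str.isIn p.1 text then some p.2 else none)
  match PySem.List.min? found (fun x => x) with
  | some m =>
      "https://cdn.dummyjson.com/product-images/" ++
        PySem.Int.toStr (PySem.Int.mod product_id 100 + 1 + m) ++ "/1.jpg"
  | none => "https://picsum.photos/300/300?random=" ++ PySem.Int.toStr product_id

-- ===== PRECONDITION & SPEC =====
def Spec_get_product_image (product_id : Int) (title : String) (description : Option String) (out : String) : Prop := out = get_product_image_alt product_id title description
instance (product_id : Int) (title : String) (description : Option String) (out : String) : Decidable (Spec_get_product_image product_id title description out) := by unfold Spec_get_product_image; infer_instance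

-- ===== CLAIM (what is proved, stated in full; the proofs are below) =====
def Claim_equal_get_product_image : Prop := ∀ (product_id : Int) (title : String) (description : Option String), Dom_get_product_image product_id title description → Spec_get_product_image product_id title description (get_product_image product_id title description)

-- ===== LEMMAS AND PROOFS =====

/-- filterMap over a group of words sharing one offset is a constant-map of the filter. -/
theorem pv_filterMap_const (off : Int) (c : String → Bool) (ws : List String) :
    ws.filterMap (fun w => if c w then some off else none) = (ws.filter c).map (fun _ => off) := by
  induction ws with
  | nil => simp
  | cons w ws ih =>
    by_cases h : c w <;> simp [h, ih]

/-- `any` is the non-emptiness of the filter. -/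
theorem pv_any_filter (c : String → Bool) (ws : List String) :
    ws.any c = !(ws.filter c).isEmpty := by
  induction ws with
  | nil => simp
  | cons w ws ih =>
    simp only [List.any_cons, List.filter_cons]
    by_cases h : c w = true <;> simp [h, ih]

theorem pv_foldl_min_const (a : Int) (l : List Int) (h : ∀ x ∈ l, a ≤ x) :
    l.foldl min a = a := by
  induction l with
  | nil => rfl
  | cons x l ih =>
    simp only [List.foldl_cons]
    rw [min_eq_left (h x (by simp))]
    exact ih (fun y hy => h y (by simp [hy]))

/-- min over a constant-valued group followed by larger-valued tail. -/
theorem pv_min_const_append (a : Int) (l : List String) (r : List Int)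
    (h : ∀ x ∈ r, a ≤ x) :
    PySem.List.min? (l.map (fun _ => a) ++ r) (fun x => x) =
      if l.isEmpty then PySem.List.min? r (fun x => x) else some a := by
  cases l with
  | nil => simp only [List.map_nil, List.nil_append, List.isEmpty_nil, if_true]
  | cons w l =>
    simp only [List.map_cons, List.cons_append, PySem.List.min?_id_cons, List.isEmpty_cons,
      Bool.false_eq_true, if_false]
    rw [List.foldl_append, pv_foldl_min_const a (l.map fun _ => a) (by simp),
      pv_foldl_min_const a r h]

theorem pv_min_const (a : Int) (l : List String) :
    PySem.List.min? (l.map (fun _ => a)) (fun x => x) =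
      if l.isEmpty then none else some a := by
  have := pv_min_const_append a l [] (by simp)
  simpa using this

theorem pv_htab (text : String) :
    pvTable.filterMap (fun p => if PySem.Str.isIn p.1 text then some p.2 else none) =
      ((["phone", "mobile", "smartphone", "iphone", "android"].filter (fun w => PySem.Str.isIn w text)).map (fun _ => (0:Int))) ++
      (((["laptop", "computer", "pc", "macbook"].filter (fun w => PySem.Str.isIn w text)).map (fun _ => (100:Int))) ++
      (((["shirt", "tshirt", "t-shirt", "top", "blouse"].filter (fun w => PySem.Str.isIn w text)).map (fun _ => (200:Int))) ++
      (((["shoe", "sneaker", "boot", "footwear"].filter (fun w => PySem.Str.isIn w text)).map (fun _ => (300:Int))) ++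
      ((["watch", "smartwatch"].filter (fun w => PySem.Str.isIn w text)).map (fun _ => (400:Int)))))) := by
  have h : pvTable =
      (["phone", "mobile", "smartphone", "iphone", "android"].map (fun w => (w, (0:Int)))) ++
      ((["laptop", "computer", "pc", "macbook"].map (fun w => (w, (100:Int)))) ++
      ((["shirt", "tshirt", "t-shirt", "top", "blouse"].map (fun w => (w, (200:Int)))) ++
      ((["shoe", "sneaker", "boot", "footwear"].map (fun w => (w, (300:Int)))) ++
      (["watch", "smartwatch"].map (fun w => (w, (400:Int))))))) := rfl
  rw [h]
  simp only [List.filterMap_append, List.filterMap_map, Function.comp_def]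
  simp only [pv_filterMap_const]

theorem pv_hm (a : Int) (gs : List (List String × Int)) (text : String)
    (hle : ∀ g ∈ gs, a ≤ g.2) :
    ∀ x ∈ (gs.map (fun g => (g.1.filter (fun w => PySem.Str.isIn w text)).map (fun _ => g.2))).flatten,
      a ≤ x := by
  intro x hx
  simp only [List.mem_flatten, List.mem_map] at hx
  obtain ⟨l, ⟨g, hg, rfl⟩, hxl⟩ := hx
  obtain ⟨_, _, rfl⟩ := List.mem_map.mp hxl
  exact hle g hg

-- ===== VERDICT (by name: the statement is the Claim_ definition above) =====
theorem get_product_image_spec : Claim_equal_get_product_image := by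
  intro pid title desc _
  simp only [Spec_get_product_image, get_product_image, get_product_image_alt]
  generalize (PySem.Str.lower (title ++ " " ++ desc.getD "")) = text
  have hm0 := pv_hm 0 [(["laptop", "computer", "pc", "macbook"], 100),
    (["shirt", "tshirt", "t-shirt", "top", "blouse"], 200),
    (["shoe", "sneaker", "boot", "footwear"], 300), (["watch", "smartwatch"], 400)] text (by norm_num)
  have hm1 := pv_hm 100 [(["shirt", "tshirt", "t-shirt", "top", "blouse"], 200),
    (["shoe", "sneaker", "boot", "footwear"], 300), (["watch", "smartwatch"], 400)] text (by norm_num)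
  have hm2 := pv_hm 200 [(["shoe", "sneaker", "boot", "footwear"], 300),
    (["watch", "smartwatch"], 400)] text (by norm_num)
  have hm3 := pv_hm 300 [(["watch", "smartwatch"], 400)] text (by norm_num)
  simp only [List.map_cons, List.map_nil, List.flatten_cons, List.flatten_nil,
    List.append_nil] at hm0 hm1 hm2 hm3
  simp only [pv_any_filter]
  rw [pv_htab text, pv_min_const_append 0 _ _ hm0]
  by_cases e0 : (["phone", "mobile", "smartphone", "iphone", "android"].filter (fun w => PySem.Str.isIn w text)).isEmpty
  · rw [if_pos e0]
    simp only [e0, Bool.not_true, Bool.false_eq_true, if_false]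
    rw [pv_min_const_append 100 _ _ hm1]
    by_cases e1 : (["laptop", "computer", "pc", "macbook"].filter (fun w => PySem.Str.isIn w text)).isEmpty
    · rw [if_pos e1]
      simp only [e1, Bool.not_true, Bool.false_eq_true, if_false]
      rw [pv_min_const_append 200 _ _ hm2]
      by_cases e2 : (["shirt", "tshirt", "t-shirt", "top", "blouse"].filter (fun w => PySem.Str.isIn w text)).isEmpty
      · rw [if_pos e2]
        simp only [e2, Bool.not_true, Bool.false_eq_true, if_false]
        rw [pv_min_const_append 300 _ _ hm3]
        by_cases e3 : (["shoe", "sneaker", "boot", "footwear"].filter (fun w => PySem.Str.isIn w text)).isEmpty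
        · rw [if_pos e3]
          simp only [e3, Bool.not_true, Bool.false_eq_true, if_false]
          rw [pv_min_const]
          by_cases e4 : (["watch", "smartwatch"].filter (fun w => PySem.Str.isIn w text)).isEmpty
          · rw [if_pos e4]
            simp only [e4, Bool.not_true, Bool.false_eq_true, if_false]
          · rw [if_neg e4]
            simp only [Bool.not_eq_true] at e4
            simp only [e4, Bool.not_false, if_true]
        · rw [if_neg e3]
          simp only [Bool.not_eq_true] at e3
          simp only [e3, Bool.not_false, if_true]
      · rw [if_neg e2]
        simp only [Bool.not_eq_true] at e2
        simp only [e2, Bool.not_false, if_true]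
    · rw [if_neg e1]
      simp only [Bool.not_eq_true] at e1
      simp only [e1, Bool.not_false, if_true]
  · rw [if_neg e0]
    simp only [Bool.not_eq_true] at e0
    simp only [e0, Bool.not_false, if_true, add_zero]
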